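-- pv_equiv track=rewrite | github.com/Polotenchik/Python-foundation-training | Tasks_Part2/task-2-5.py | splitFunc
-- ===== SOURCE A (Python) =====
-- def splitFunc(str, splitter):
--     listOrigin = [ i for i in str ]
--     j = 0
--
--     if splitter == '':
--         return listOrigin
--     else:
--         list = []
--         while j < (len(listOrigin)*2 - 1):
--             if j % 2 == 0:
--                 list.append(str[j//2])
--             else:
--                 list.append(splitter)
--             j = j + 1
--
--         return list
-- ===== SOURCE B (Python) =====
-- def splitFunc(str, splitter):
--     if splitter == '':
--         return [c for c in str]
--     result = []
--     for ch in str: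
--         result.append(ch)
--         result.append(splitter)
--     return result[:-1]
-- ===== Notes on version B (the rewrite author's own statement) =====
-- stated objective: simpler
-- what changed: B iterates directly over the input characters, appending character then splitter and returning result[:-1], instead of A's while loop over 2n-1 output positions with j%2 parity tests and str[j//2] index arithmetic.
import Mathlib
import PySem

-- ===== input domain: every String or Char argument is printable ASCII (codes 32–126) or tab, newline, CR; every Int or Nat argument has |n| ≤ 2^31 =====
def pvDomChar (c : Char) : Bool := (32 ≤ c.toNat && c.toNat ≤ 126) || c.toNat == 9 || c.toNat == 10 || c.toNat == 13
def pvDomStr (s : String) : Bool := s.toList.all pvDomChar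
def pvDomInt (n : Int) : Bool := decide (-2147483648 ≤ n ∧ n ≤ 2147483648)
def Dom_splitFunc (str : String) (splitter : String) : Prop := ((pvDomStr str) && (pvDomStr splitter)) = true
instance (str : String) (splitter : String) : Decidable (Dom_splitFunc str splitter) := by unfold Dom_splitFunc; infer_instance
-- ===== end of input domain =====

-- B replaces A's while loop over 2n-1 output positions (j%2 parity, str[j//2] indexing)
-- by a direct iteration over the characters followed by result[:-1]; objective: simpler.

-- ===== PORT A =====
def splitFunc (str : String) (splitter : String) : List String :=
  let listOrigin := str.toList.map (fun c => String.mk [c])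
  if splitter == "" then listOrigin
  else
    (PySem.List.pyRange 0 (2 * (listOrigin.length : Int) - 1) 1).foldl
      (fun acc j =>
        if PySem.Int.mod j 2 == 0 then
          acc ++ [(match PySem.Str.pyGet? str (PySem.Int.floordiv j 2) with
                   | some c => String.mk [c]
                   | none => "")]   -- none unreachable: j//2 < len(str) on every loop iteration
        else
          acc ++ [splitter]) []

-- ===== PORT B =====
def splitFunc_alt (str : String) (splitter : String) : List String :=
  if splitter == "" then str.toList.map (fun c => String.mk [c])
  else
    PySem.List.slice
      (str.toList.foldl (fun acc c => acc ++ [String.mk [c], splitter]) [])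
      none (some (-1))

-- ===== PRECONDITION & SPEC =====
def Spec_splitFunc (str : String) (splitter : String) (out : List String) : Prop := out = splitFunc_alt str splitter
instance (str : String) (splitter : String) (out : List String) : Decidable (Spec_splitFunc str splitter out) := by unfold Spec_splitFunc; infer_instance

-- ===== CLAIM (what is proved, stated in full; the proofs are below) =====
def Claim_equal_splitFunc : Prop := ∀ (str : String) (splitter : String), Dom_splitFunc str splitter → Spec_splitFunc str splitter (splitFunc str splitter)

-- ===== LEMMAS AND PROOFS =====

-- Indexing the flattened pairs list: element k is the (k/2)-th character for even k, the splitter for odd k.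
theorem pv_flat_getElem (cs : List Char) (sp : String) (k : Nat)
    (hk : k < (cs.flatMap (fun c => [String.mk [c], sp])).length) :
    (cs.flatMap (fun c => [String.mk [c], sp]))[k] =
      if k % 2 = 0 then String.mk [cs.getD (k / 2) 'a'] else sp := by
  induction cs generalizing k with
  | nil => simp at hk
  | cons c cs ih =>
    match k with
    | 0 => simp
    | 1 => simp
    | (k + 2) =>
      have hk' : k < (cs.flatMap (fun c => [String.mk [c], sp])).length := by
        simp [List.length_flatMap] at hk ⊢
        omega
      have h2 : (k + 2) % 2 = k % 2 := by omega
      have h3 : (k + 2) / 2 = k / 2 + 1 := by omega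
      simpa [List.flatMap_cons, List.getElem_append_right, h2, h3] using ih k hk'

theorem pv_flat_length (cs : List Char) (sp : String) :
    (cs.flatMap (fun c => [String.mk [c], sp])).length = 2 * cs.length := by
  induction cs with
  | nil => simp
  | cons c cs ih => simp [List.flatMap_cons, ih]; omega

-- ===== VERDICT (by name: the statement is the Claim_ definition above) =====
theorem splitFunc_spec : Claim_equal_splitFunc := by
  intro str splitter _
  unfold Spec_splitFunc splitFunc splitFunc_alt
  by_cases hsp : splitter == ""
  · simp [hsp]
  · simp only [hsp, if_false, Bool.false_eq_true]
    set cs := str.toList with hcs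
    set n := cs.length with hn
    rw [PySem.List.slice_to_neg_one]
    rw [PySem.List.foldl_append_eq_flatMap, List.nil_append]
    rw [PySem.List.pyRange_one]
    rw [List.foldl_map]
    have hA : ∀ (acc : List String) (m : List Nat), (∀ k ∈ m, k % 2 = 0 → k / 2 < n) →
        m.foldl (fun acc (k : Nat) =>
          if PySem.Int.mod (0 + (k : Int)) 2 == 0 then
            acc ++ [(match PySem.Str.pyGet? str (PySem.Int.floordiv (0 + (k : Int)) 2) with
                     | some c => String.mk [c] | none => "")]
          else acc ++ [splitter]) acc
        = acc ++ m.map (fun k =>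
            if k % 2 = 0 then String.mk [cs.getD (k / 2) 'a'] else splitter) := by
      intro acc m hm
      induction m generalizing acc with
      | nil => simp
      | cons k m ih =>
        have hmod : PySem.Int.mod (0 + (k : Int)) 2 = ((k % 2 : Nat) : Int) := by
          have := PySem.Int.mod_natCast k 2
          simpa using this
        have hm' : ∀ j ∈ m, j % 2 = 0 → j / 2 < n := fun j hj => hm j (List.mem_cons_of_mem _ hj)
        by_cases hk : k % 2 = 0
        · have hdiv : PySem.Int.floordiv (0 + (k : Int)) 2 = ((k / 2 : Nat) : Int) := by
            have := PySem.Int.floordiv_natCast k 2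
            simpa using this
          have hget : PySem.Str.pyGet? str ((k / 2 : Nat) : Int) = cs[(k/2)]? := by
            simp only [PySem.Str.pyGet?, PySem.Chars.pyGet?, hcs]
            exact PySem.List.pyGet?_natCast _ _
          have hlt : k / 2 < n := hm k (List.mem_cons_self) hk
          have hsome : cs[(k/2)]? = some cs[k/2] := List.getElem?_eq_getElem (by omega)
          simp only [List.foldl_cons, hmod, hdiv, hget, hk, hsome]
          rw [ih _ hm']
          simp [List.getD, hsome, hk]
        · simp only [List.foldl_cons, hmod]
          have hne : ¬ (((k % 2 : Nat) : Int) == 0) = true := by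
            simp; omega
          simp only [hne, if_false, Bool.false_eq_true]
          rw [ih _ hm']
          simp [hk]
    have hrange : (2 * ((str.toList.map (fun c => String.mk [c])).length : Int) - 1 - 0).toNat
        = 2 * n - 1 := by
      simp [hn, hcs]
      omega
    rw [hrange, hA [] (List.range (2 * n - 1)) (by
      intro k hk _
      rw [List.mem_range] at hk
      omega)]
    -- both sides element by element
    apply List.ext_getElem
    · simp only [List.nil_append, List.length_map, List.length_range,
        List.length_dropLast, pv_flat_length]
      rfl
    · intro k h1 h2
      have hk1 : k < 2 * n - 1 := by simpa using h1
      have hflatlen := pv_flat_length cs splitter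
      rw [List.getElem_dropLast, pv_flat_getElem cs splitter k (by omega)]
      simp
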